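-- pv_equiv track=rewrite | github.com/piyushgrover972/python_leetcode_geeks_for_geeks | geeksforgeeks/num_palindromes.py | palindromicStrings
-- ===== SOURCE A (Python) =====
-- from math import ceil
--
-- def palindromicStrings(max_len, max_chars):
--     n_str = 0
--     mod = (10**9) + 7
--     for i in range(1, max_len + 1):
--         # Single character strings, viz. "a", "b", etc. and,
--         # Repeated single character strings, viz. "aa", "bb", etc.
--         if i == 1 or i == 2:
--             n_str += max_chars
--
--         elif max_len <= 2 * max_chars:
--             combis = 1
--             for j in range(int(ceil(i / 2))):
--                 combis *= max_chars - j
--             n_str += combis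
--         else:
--             # No combinations possible with given constraints
--             pass
--
--     return n_str % mod
-- ===== SOURCE B (Python) =====
-- def palindromicStrings(max_len, max_chars):
--     mod = (10**9) + 7
--     total = max_chars * min(max(max_len, 0), 2)
--     if max_len >= 3 and max_len <= 2 * max_chars:
--         p = max_chars  # running falling factorial max_chars * (max_chars-1) * ... over ceil(i/2) factors
--         for i in range(3, max_len + 1):
--             if i % 2 == 1:
--                 p *= max_chars - (i - 1) // 2
--             total += p
--     return total % mod
-- ===== Notes on version B (the rewrite author's own statement) =====
-- stated objective: faster
-- what changed: Instead of recomputing the falling-factorial product from scratch for every length i (A's inner loop over ceil(i/2) factors), B maintains one running falling-factorial product, multiplying in one new factor only when the half-length grows (at each odd i), in a single pass over the lengths.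
import Mathlib
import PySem

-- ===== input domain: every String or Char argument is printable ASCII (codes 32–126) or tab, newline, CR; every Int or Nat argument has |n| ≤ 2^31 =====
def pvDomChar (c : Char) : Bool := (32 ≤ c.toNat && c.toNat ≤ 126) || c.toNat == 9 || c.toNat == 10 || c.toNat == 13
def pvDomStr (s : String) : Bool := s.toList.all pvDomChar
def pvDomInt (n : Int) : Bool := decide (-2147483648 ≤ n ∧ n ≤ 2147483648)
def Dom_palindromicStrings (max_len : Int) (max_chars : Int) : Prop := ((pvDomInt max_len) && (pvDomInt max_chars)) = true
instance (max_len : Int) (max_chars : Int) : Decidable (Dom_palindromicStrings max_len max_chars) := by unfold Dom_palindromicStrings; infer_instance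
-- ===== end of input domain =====

-- B replaces A's per-length inner product loop by one running falling-factorial product (faster: O(max_len) vs O(max_len^2)).

-- ===== PORT A =====
-- A's inner loop 'combis = 1; for j in range(int(ceil(i/2))): combis *= max_chars - j'.
-- int(ceil(i/2)) is ported as (i+1)//2: exact for every integer i of the stated |i| ≤ 2^31 domain
-- (i/2 is exact as a float there, and ceil(k/2) = (k+1)//2 for every integer k).
def aCombis (max_chars k : Int) : Int :=
  (PySem.List.pyRange 0 k 1).foldl (fun combis j => combis * (max_chars - j)) 1

-- the body of A's outer 'for i in range(1, max_len + 1)' loop, acting on n_str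
def aStep (max_len max_chars n_str i : Int) : Int :=
  if i = 1 ∨ i = 2 then n_str + max_chars
  else if max_len ≤ 2 * max_chars then
    n_str + aCombis max_chars (PySem.Int.floordiv (i + 1) 2)
  else n_str

def palindromicStrings (max_len : Int) (max_chars : Int) : Int :=
  PySem.Int.mod ((PySem.List.pyRange 1 (max_len + 1) 1).foldl (aStep max_len max_chars) 0)
    (10 ^ 9 + 7)

-- ===== PORT B =====
-- the body of B's 'for i in range(3, max_len + 1)' loop, acting on (p, total)
def bStep (max_chars : Int) (s : Int × Int) (i : Int) : Int × Int :=
  let p := if PySem.Int.mod i 2 = 1 then s.1 * (max_chars - PySem.Int.floordiv (i - 1) 2)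
           else s.1
  (p, s.2 + p)

def palindromicStrings_alt (max_len : Int) (max_chars : Int) : Int :=
  let total : Int := max_chars * min (max max_len 0) 2
  let total : Int :=
    if 3 ≤ max_len ∧ max_len ≤ 2 * max_chars then
      ((PySem.List.pyRange 3 (max_len + 1) 1).foldl (bStep max_chars) (max_chars, total)).2
    else total
  PySem.Int.mod total (10 ^ 9 + 7)

-- ===== PRECONDITION & SPEC =====
def Spec_palindromicStrings (max_len : Int) (max_chars : Int) (out : Int) : Prop := out = palindromicStrings_alt max_len max_chars
instance (max_len : Int) (max_chars : Int) (out : Int) : Decidable (Spec_palindromicStrings max_len max_chars out) := by unfold Spec_palindromicStrings; infer_instance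

-- ===== CLAIM (what is proved, stated in full; the proofs are below) =====
def Claim_equal_palindromicStrings : Prop := ∀ (max_len : Int) (max_chars : Int), Dom_palindromicStrings max_len max_chars → Spec_palindromicStrings max_len max_chars (palindromicStrings max_len max_chars)

-- ===== LEMMAS AND PROOFS =====

lemma aCombis_succ (mc k : Int) (hk : 0 ≤ k) :
    aCombis mc (k + 1) = aCombis mc k * (mc - k) := by
  unfold aCombis
  rw [PySem.List.pyRange_one_succ_right hk, List.foldl_append]
  rfl

-- A's loop body once max_len ≤ 2*max_chars is fixed (no longer mentions max_len)
def abody (mc acc i : Int) : Int :=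
  if i = 1 ∨ i = 2 then acc + mc else acc + aCombis mc (PySem.Int.floordiv (i + 1) 2)

def afold (mc n : Int) : Int := (PySem.List.pyRange 1 (n + 1) 1).foldl (abody mc) 0

lemma floordiv_pos_eq (a b : Int) (hb : 0 < b) : PySem.Int.floordiv a b = a / b :=
  PySem.Int.floordiv_eq_ediv_of_pos hb

lemma afold_succ (mc n : Int) (hn : 2 ≤ n) :
    afold mc (n + 1) = afold mc n + aCombis mc (PySem.Int.floordiv (n + 2) 2) := by
  unfold afold
  rw [show n + 1 + 1 = (n + 1) + 1 from rfl,
      PySem.List.pyRange_one_succ_right (by omega : (1:Int) ≤ n + 1), List.foldl_append]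
  simp only [List.foldl_cons, List.foldl_nil, abody]
  rw [if_neg (by omega : ¬(n + 1 = 1 ∨ n + 1 = 2))]
  ring_nf

-- the loop invariant of B: after processing lengths 3..n the pair is
-- (current falling-factorial product = aCombis ⌈n/2⌉, A's running sum)
lemma b_invariant (mc n : Int) (hn : 2 ≤ n) :
    (PySem.List.pyRange 3 (n + 1) 1).foldl (bStep mc) (mc, 2 * mc)
      = (aCombis mc (PySem.Int.floordiv (n + 1) 2), afold mc n) := by
  induction n, hn using Int.le_induction with
  | base =>
      rw [PySem.List.pyRange_one_eq_nil (by omega : (2:Int) + 1 ≤ 3)]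
      simp only [List.foldl_nil, Prod.mk.injEq]
      constructor
      · -- aCombis mc ((2+1)//2) = aCombis mc 1 = mc
        rw [floordiv_pos_eq _ _ (by omega)]
        norm_num [aCombis, PySem.List.pyRange]
      · -- afold mc 2 = 2*mc : fold over [1, 2]
        unfold afold
        rw [PySem.List.pyRange_one_cons (by omega : (1:Int) < 2 + 1),
            PySem.List.pyRange_one_cons (by omega : (1:Int) + 1 < 2 + 1),
            PySem.List.pyRange_one_eq_nil (by omega : (2:Int) + 1 ≤ 1 + 1 + 1)]
        norm_num [abody]
        ring
  | succ m hm ih =>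
      rw [show m + 1 + 1 = (m + 1) + 1 from rfl,
          PySem.List.pyRange_one_succ_right (by omega : (3:Int) ≤ m + 1),
          List.foldl_append, ih]
      simp only [List.foldl_cons, List.foldl_nil, bStep]
      rw [afold_succ mc m hm]
      rcases Int.even_or_odd m with ⟨k, hk⟩ | ⟨k, hk⟩
      · -- m even, so length m+1 is odd: the product gains the factor (mc - m/2)
        have hmod : PySem.Int.mod (m + 1) 2 = 1 := by
          rw [PySem.Int.mod_eq_emod_of_pos (by omega)]; omega
        rw [if_pos hmod]
        have h1 : PySem.Int.floordiv (m + 1 - 1) 2 = k := by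
          rw [floordiv_pos_eq _ _ (by omega)]; omega
        have h2 : PySem.Int.floordiv (m + 1) 2 = k := by
          rw [floordiv_pos_eq _ _ (by omega)]; omega
        have h3 : PySem.Int.floordiv (m + 2) 2 = k + 1 := by
          rw [floordiv_pos_eq _ _ (by omega)]; omega
        have h4 : PySem.Int.floordiv (m + 1 + 1) 2 = k + 1 := by
          rw [floordiv_pos_eq _ _ (by omega)]; omega
        rw [h1, h2, h3, h4, aCombis_succ mc k (by omega)]
      · -- m odd, so length m+1 is even: the product is unchanged
        have hmod : ¬ PySem.Int.mod (m + 1) 2 = 1 := by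
          rw [PySem.Int.mod_eq_emod_of_pos (by omega)]; omega
        rw [if_neg hmod]
        have h3 : PySem.Int.floordiv (m + 2) 2 = k + 1 := by
          rw [floordiv_pos_eq _ _ (by omega)]; omega
        have h4 : PySem.Int.floordiv (m + 1 + 1) 2 = k + 1 := by
          rw [floordiv_pos_eq _ _ (by omega)]; omega
        have h2 : PySem.Int.floordiv (m + 1) 2 = k + 1 := by
          rw [floordiv_pos_eq _ _ (by omega)]; omega
        rw [h2, h3, h4]

-- when max_len > 2*max_chars, A's loop ignores every length i ≥ 3
lemma afold_pass (ml mc n : Int) (hn : 2 ≤ n) (hml : ¬ ml ≤ 2 * mc) (acc : Int) :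
    (PySem.List.pyRange 3 (n + 1) 1).foldl (aStep ml mc) acc = acc := by
  induction n, hn using Int.le_induction with
  | base => rw [PySem.List.pyRange_one_eq_nil (by omega : (2:Int) + 1 ≤ 3)]; rfl
  | succ m hm ih =>
      rw [show m + 1 + 1 = (m + 1) + 1 from rfl,
          PySem.List.pyRange_one_succ_right (by omega : (3:Int) ≤ m + 1),
          List.foldl_append, ih]
      simp only [List.foldl_cons, List.foldl_nil, aStep]
      rw [if_neg (by omega : ¬(m + 1 = 1 ∨ m + 1 = 2)), if_neg hml]

-- ===== VERDICT (by name: the statement is the Claim_ definition above) =====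
theorem palindromicStrings_spec : Claim_equal_palindromicStrings := by
  intro ml mc _
  unfold Spec_palindromicStrings palindromicStrings palindromicStrings_alt
  simp only []
  congr 1
  by_cases h3 : 3 ≤ ml
  · have hmin : mc * min (max ml 0) 2 = 2 * mc := by
      rw [max_eq_left (by omega : (0:Int) ≤ ml), min_eq_right (by omega : (2:Int) ≤ ml)]
      ring
    by_cases hcomb : ml ≤ 2 * mc
    · -- with combinations: A's whole fold is afold, B's snd is afold by the invariant
      have hA : (PySem.List.pyRange 1 (ml + 1) 1).foldl (aStep ml mc) 0 = afold mc ml := by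
        unfold afold
        apply PySem.List.foldl_congr_mem
        intro acc i _
        by_cases h12 : i = 1 ∨ i = 2
        · rw [aStep, if_pos h12, abody, if_pos h12]
        · rw [aStep, if_neg h12, if_pos hcomb, abody, if_neg h12]
      rw [hA, if_pos ⟨h3, hcomb⟩, hmin, b_invariant mc ml (by omega)]
    · -- no combinations: both sides are 2*max_chars
      rw [if_neg (by intro h; exact hcomb h.2), hmin,
          PySem.List.pyRange_one_cons (by omega : (1:Int) < ml + 1),
          PySem.List.pyRange_one_cons (by omega : (1:Int) + 1 < ml + 1),
          show (1:Int) + 1 = 2 from rfl, show (2:Int) + 1 = 3 from rfl]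
      simp only [List.foldl_cons]
      rw [afold_pass ml mc ml (by omega) hcomb]
      simp only [aStep]
      norm_num
      ring
  · -- max_len ≤ 2: only the first two lengths can contribute
    rw [if_neg (by intro h; exact h3 h.1)]
    rcases (by omega : ml ≤ 0 ∨ ml = 1 ∨ ml = 2) with h0 | h1 | h2
    · rw [PySem.List.pyRange_one_eq_nil (by omega : ml + 1 ≤ 1),
          max_eq_right (by omega : ml ≤ (0:Int))]
      norm_num
    · subst h1
      rw [PySem.List.pyRange_one_cons (by omega : (1:Int) < 1 + 1),
          PySem.List.pyRange_one_eq_nil (by omega : (1:Int) + 1 ≤ 1 + 1)]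
      simp only [List.foldl_cons, List.foldl_nil]
      simp only [aStep]
      norm_num
    · subst h2
      rw [PySem.List.pyRange_one_cons (by omega : (1:Int) < 2 + 1),
          PySem.List.pyRange_one_cons (by omega : (1:Int) + 1 < 2 + 1),
          PySem.List.pyRange_one_eq_nil (by omega : (2:Int) + 1 ≤ 1 + 1 + 1),
          show (1:Int) + 1 = 2 from rfl]
      simp only [List.foldl_cons, List.foldl_nil]
      simp only [aStep]
      norm_num
      ring
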